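-- pv_equiv track=rewrite | github.com/RyloRiz/accent | detector_server.py | choose_label_rect
-- ===== SOURCE A (Python) =====
-- from typing import Any, Dict, Tuple, List
--
-- def rects_overlap(a: Tuple[int, int, int, int], b: Tuple[int, int, int, int], padding: int = 4) -> bool:
--     return not (
--         a[2] + padding <= b[0]
--         or b[2] + padding <= a[0]
--         or a[3] + padding <= b[1]
--         or b[3] + padding <= a[1]
--     )
--
-- def clamp_label_rect(
--     x1: int,
--     y1: int,
--     width: int,
--     height: int,
--     image_width: int,
--     image_height: int,
-- ) -> Tuple[int, int, int, int]:
--     x1 = max(0, min(x1, image_width - width - 1))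
--     y1 = max(0, min(y1, image_height - height - 1))
--     return (x1, y1, x1 + width, y1 + height)
--
-- def choose_label_rect(
--     box: Tuple[int, int, int, int],
--     label_width: int,
--     label_height: int,
--     image_width: int,
--     image_height: int,
--     used_label_rects: List[Tuple[int, int, int, int]],
-- ) -> Tuple[int, int, int, int]:
--     x1, y1, x2, y2 = box
--     gap = 8
--     candidates = [
--         (x1, y1 - label_height - gap),
--         (x1, y2 + gap),
--         (x2 - label_width, y1 - label_height - gap),
--         (x2 - label_width, y2 + gap),
--         (x2 + gap, y1),
--         (x1 - label_width - gap, y1),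
--         (x1, y1),
--     ]
--
--     clamped = [
--         clamp_label_rect(x, y, label_width, label_height, image_width, image_height)
--         for x, y in candidates
--     ]
--
--     for rect in clamped:
--         if not any(rects_overlap(rect, used) for used in used_label_rects):
--             return rect
--
--     return min(
--         clamped,
--         key=lambda rect: sum(1 for used in used_label_rects if rects_overlap(rect, used)),
--     )
-- ===== SOURCE B (Python) =====
-- def choose_label_rect(box, label_width, label_height, image_width, image_height, used_label_rects):
--     # Transposed strategy: clamp all candidates once, then make a SINGLE pass over
--     # used_label_rects accumulating a per-candidate overlap-count vector (the loop
--     # nesting is inverted relative to testing each candidate against every used rect),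
--     # and finally take the first candidate with the minimal count.  A zero count is
--     # minimal and the scan is first-stable, so this matches the "first free candidate,
--     # else min-overlap" selection.
--     x1, y1, x2, y2 = box
--     gap = 8
--     candidates = [
--         (x1, y1 - label_height - gap),
--         (x1, y2 + gap),
--         (x2 - label_width, y1 - label_height - gap),
--         (x2 - label_width, y2 + gap),
--         (x2 + gap, y1),
--         (x1 - label_width - gap, y1),
--         (x1, y1),
--     ]
--     clamped = [
--         (cx, cy, cx + label_width, cy + label_height)
--         for x, y in candidates
--         for cx in (max(0, min(x, image_width - label_width - 1)),)
--         for cy in (max(0, min(y, image_height - label_height - 1)),)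
--     ]
--     counts = [0] * len(clamped)
--     for ux1, uy1, ux2, uy2 in used_label_rects:
--         counts = [
--             c + 1 if not (rx2 + 4 <= ux1 or ux2 + 4 <= rx1
--                           or ry2 + 4 <= uy1 or uy2 + 4 <= ry1) else c
--             for (rx1, ry1, rx2, ry2), c in zip(clamped, counts)
--         ]
--     best = None
--     for rect, c in zip(clamped, counts):
--         if best is None or c < best[1]:
--             best = (rect, c)
--     return best[0]
-- ===== Notes on version B (the rewrite author's own statement) =====
-- stated objective: alternative
-- what changed: Inverts the loop nesting: instead of A's per-candidate passes (a first loop returning the first overlap-free candidate, then min by overlap count scanning used rects per candidate), B makes one pass over used_label_rects accumulating a per-candidate overlap-count vector via zip, then a single first-stable argmin scan over (rect, count) pairs; equivalent because a zero count is minimal and both selections are first-stable.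
import Mathlib
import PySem

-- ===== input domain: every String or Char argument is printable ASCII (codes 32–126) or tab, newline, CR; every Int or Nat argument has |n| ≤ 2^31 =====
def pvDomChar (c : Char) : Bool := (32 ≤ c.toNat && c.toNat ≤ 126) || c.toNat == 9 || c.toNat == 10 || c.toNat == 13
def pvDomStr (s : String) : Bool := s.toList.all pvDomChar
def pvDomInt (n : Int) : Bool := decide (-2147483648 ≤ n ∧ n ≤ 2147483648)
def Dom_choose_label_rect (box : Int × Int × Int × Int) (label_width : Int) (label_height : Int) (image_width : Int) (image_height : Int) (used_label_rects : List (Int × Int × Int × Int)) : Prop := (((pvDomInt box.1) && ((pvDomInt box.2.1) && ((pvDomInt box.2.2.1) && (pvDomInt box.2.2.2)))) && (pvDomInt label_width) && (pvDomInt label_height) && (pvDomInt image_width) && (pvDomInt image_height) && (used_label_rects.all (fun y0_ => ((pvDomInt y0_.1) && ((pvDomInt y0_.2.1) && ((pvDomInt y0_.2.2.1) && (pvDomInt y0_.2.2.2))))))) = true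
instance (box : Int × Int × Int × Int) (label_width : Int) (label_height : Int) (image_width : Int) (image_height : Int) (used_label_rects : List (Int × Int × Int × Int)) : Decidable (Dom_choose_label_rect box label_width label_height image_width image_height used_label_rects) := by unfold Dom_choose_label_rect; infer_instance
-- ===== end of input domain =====

-- B inverts the loop nesting: one pass over used_label_rects accumulating a
-- per-candidate overlap-count vector, then a first-stable argmin scan;
-- objective: alternative decomposition, same cost.


-- ===== PORT A =====
def rects_overlap (a : Int × Int × Int × Int) (b : Int × Int × Int × Int) (padding : Int) : Bool :=
  !(decide (a.2.2.1 + padding ≤ b.1) || decide (b.2.2.1 + padding ≤ a.1)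
    || decide (a.2.2.2 + padding ≤ b.2.1) || decide (b.2.2.2 + padding ≤ a.2.1))

def clamp_label_rect (x1 : Int) (y1 : Int) (width : Int) (height : Int) (image_width : Int) (image_height : Int) : Int × Int × Int × Int :=
  let x1' := max 0 (min x1 (image_width - width - 1))
  let y1' := max 0 (min y1 (image_height - height - 1))
  (x1', y1', x1' + width, y1' + height)

-- the 'for rect in clamped: if not any(...): return rect' loop
def pickFreeA (used : List (Int × Int × Int × Int)) : List (Int × Int × Int × Int) → Option (Int × Int × Int × Int)
  | [] => none
  | r :: rest => if used.any (fun u => rects_overlap r u 4) then pickFreeA used rest else some r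

def choose_label_rect (box : Int × Int × Int × Int) (label_width : Int) (label_height : Int) (image_width : Int) (image_height : Int) (used_label_rects : List (Int × Int × Int × Int)) : Int × Int × Int × Int :=
  let x1 := box.1; let y1 := box.2.1; let x2 := box.2.2.1; let y2 := box.2.2.2
  let gap : Int := 8
  let candidates : List (Int × Int) :=
    [(x1, y1 - label_height - gap), (x1, y2 + gap),
     (x2 - label_width, y1 - label_height - gap), (x2 - label_width, y2 + gap),
     (x2 + gap, y1), (x1 - label_width - gap, y1), (x1, y1)]
  let clamped := candidates.map (fun p => clamp_label_rect p.1 p.2 label_width label_height image_width image_height)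
  match pickFreeA used_label_rects clamped with
  | some r => r
  | none =>
      (PySem.List.min? clamped
        (fun rect => used_label_rects.foldl (fun s u => if rects_overlap rect u 4 then s + 1 else s) (0 : Int))).getD (0, 0, 0, 0)

-- ===== PORT B =====
-- B's inlined overlap test (padding fixed at 4)
def ovB (r : Int × Int × Int × Int) (u : Int × Int × Int × Int) : Bool :=
  !(decide (r.2.2.1 + 4 ≤ u.1) || decide (u.2.2.1 + 4 ≤ r.1)
    || decide (r.2.2.2 + 4 ≤ u.2.1) || decide (u.2.2.2 + 4 ≤ r.2.1))

def choose_label_rect_alt (box : Int × Int × Int × Int) (label_width : Int) (label_height : Int) (image_width : Int) (image_height : Int) (used_label_rects : List (Int × Int × Int × Int)) : Int × Int × Int × Int :=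
  let x1 := box.1; let y1 := box.2.1; let x2 := box.2.2.1; let y2 := box.2.2.2
  let gap : Int := 8
  let candidates : List (Int × Int) :=
    [(x1, y1 - label_height - gap), (x1, y2 + gap),
     (x2 - label_width, y1 - label_height - gap), (x2 - label_width, y2 + gap),
     (x2 + gap, y1), (x1 - label_width - gap, y1), (x1, y1)]
  let clamped : List (Int × Int × Int × Int) := candidates.map (fun p =>
    let cx := max 0 (min p.1 (image_width - label_width - 1))
    let cy := max 0 (min p.2 (image_height - label_height - 1))
    (cx, cy, cx + label_width, cy + label_height))
  -- one pass over used_label_rects, updating the whole count vector with zip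
  let counts : List Int := used_label_rects.foldl
    (fun counts u => List.zipWith (fun r c => if ovB r u then c + 1 else c) clamped counts)
    (List.replicate clamped.length (0 : Int))
  -- first-stable argmin over (rect, count) pairs
  match (List.zip clamped counts).foldl
      (fun acc p => match acc with
        | none => some p
        | some b => if p.2 < b.2 then some p else some b) none with
  | some b => b.1
  | none => (0, 0, 0, 0)   -- unreachable: clamped is nonempty

-- ===== PRECONDITION & SPEC =====
def Spec_choose_label_rect (box : Int × Int × Int × Int) (label_width : Int) (label_height : Int) (image_width : Int) (image_height : Int) (used_label_rects : List (Int × Int × Int × Int)) (out : Int × Int × Int × Int) : Prop := out = choose_label_rect_alt box label_width label_height image_width image_height used_label_rects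
instance (box : Int × Int × Int × Int) (label_width : Int) (label_height : Int) (image_width : Int) (image_height : Int) (used_label_rects : List (Int × Int × Int × Int)) (out : Int × Int × Int × Int) : Decidable (Spec_choose_label_rect box label_width label_height image_width image_height used_label_rects out) := by unfold Spec_choose_label_rect; infer_instance

-- ===== CLAIM (what is proved, stated in full; the proofs are below) =====
def Claim_equal_choose_label_rect : Prop := ∀ (box : Int × Int × Int × Int) (label_width : Int) (label_height : Int) (image_width : Int) (image_height : Int) (used_label_rects : List (Int × Int × Int × Int)), Dom_choose_label_rect box label_width label_height image_width image_height used_label_rects → Spec_choose_label_rect box label_width label_height image_width image_height used_label_rects (choose_label_rect box label_width label_height image_width image_height used_label_rects)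

-- ===== LEMMAS AND PROOFS =====

-- the per-rect overlap count (A's min key)
def cnt (used : List (Int × Int × Int × Int)) (r : Int × Int × Int × Int) : Int :=
  used.foldl (fun s u => if rects_overlap r u 4 then s + 1 else s) (0 : Int)

-- the fold body of PySem.List.min?
def mstep {α : Type} (c : α → Int) (acc : Option α) (x : α) : Option α :=
  match acc with
  | none => some x
  | some m => if c x < c m then some x else some m

-- B's pair-argmin fold body, on elements already paired with their count
def pstep {α : Type} (acc : Option (α × Int)) (p : α × Int) : Option (α × Int) :=
  match acc with
  | none => some p
  | some b => if p.2 < b.2 then some p else some b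

lemma min?_eq_foldl {α : Type} (c : α → Int) (xs : List α) :
    PySem.List.min? xs c = xs.foldl (mstep c) none := rfl

lemma cnt_eq_countP (used : List (Int × Int × Int × Int)) (r : Int × Int × Int × Int) :
    cnt used r = (used.countP (fun u => rects_overlap r u 4) : Int) := by
  have key : ∀ (l : List (Int × Int × Int × Int)) (a : Int),
      l.foldl (fun s u => if rects_overlap r u 4 then s + 1 else s) a
        = a + (l.countP (fun u => rects_overlap r u 4) : Int) := by
    intro l
    induction l with
    | nil => intro a; simp
    | cons u l ihl =>
      intro a
      rw [List.foldl_cons, ihl, List.countP_cons]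
      by_cases hb : rects_overlap r u 4
      · rw [if_pos hb, if_pos hb]; push_cast; ring
      · rw [if_neg hb, if_neg hb]; simp
  simpa [cnt] using key used 0

lemma cnt_nonneg (used : List (Int × Int × Int × Int)) (r : Int × Int × Int × Int) :
    0 ≤ cnt used r := by
  rw [cnt_eq_countP]; exact_mod_cast Nat.zero_le _

lemma any_eq_cnt (used : List (Int × Int × Int × Int)) (r : Int × Int × Int × Int) :
    (used.any (fun u => rects_overlap r u 4) = false) ↔ cnt used r = 0 := by
  rw [cnt_eq_countP, Nat.cast_eq_zero, List.countP_eq_zero, List.any_eq_false]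

lemma foldl_mstep_stay {α : Type} (c : α → Int) (m : List α) (s : α)
    (h : ∀ y ∈ m, ¬ c y < c s) : m.foldl (mstep c) (some s) = some s := by
  induction m with
  | nil => rfl
  | cons y m ih =>
    have hy := h y (by simp)
    simp only [List.foldl_cons, mstep, if_neg hy]
    exact ih (fun z hz => h z (by simp [hz]))

lemma foldl_mstep_seed {α : Type} (c : α → Int) (m : List α) :
    ∀ (s t r : α), m.foldl (mstep c) (some t) = some r → c r < c s → c s ≤ c t →
      m.foldl (mstep c) (some s) = some r := by
  induction m with
  | nil =>
    intro s t r h h1 h2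
    simp only [List.foldl_nil, Option.some.injEq] at h
    subst h; omega
  | cons x m ih =>
    intro s t r h h1 h2
    simp only [List.foldl_cons, mstep] at h ⊢
    by_cases hxt : c x < c t
    · rw [if_pos hxt] at h
      by_cases hxs : c x < c s
      · rw [if_pos hxs]; exact h
      · rw [if_neg hxs]; exact ih s x r h h1 (by omega)
    · rw [if_neg hxt] at h
      by_cases hxs : c x < c s
      · omega
      · rw [if_neg hxs]; exact ih s t r h h1 h2

lemma foldl_mstep_none_seed {α : Type} (c : α → Int) (m : List α) (s r : α)
    (h : m.foldl (mstep c) none = some r) (h1 : c r < c s) :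
    m.foldl (mstep c) (some s) = some r := by
  cases m with
  | nil => simp [List.foldl_nil] at h
  | cons y m =>
    simp only [List.foldl_cons, mstep] at h ⊢
    by_cases hys : c y < c s
    · rw [if_pos hys]; exact h
    · rw [if_neg hys]; exact foldl_mstep_seed c m s y r h h1 (by omega)

lemma pickFreeA_zero (used : List (Int × Int × Int × Int)) :
    ∀ (m : List (Int × Int × Int × Int)) (r : Int × Int × Int × Int),
      pickFreeA used m = some r → cnt used r = 0 := by
  intro m
  induction m with
  | nil => intro r h; simp [pickFreeA] at h
  | cons x m ih =>
    intro r h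
    simp only [pickFreeA] at h
    by_cases hx : used.any (fun u => rects_overlap x u 4) = true
    · rw [if_pos hx] at h; exact ih r h
    · rw [if_neg hx] at h
      cases h
      exact (any_eq_cnt used x).mp (by revert hx; cases used.any (fun u => rects_overlap x u 4) <;> simp)

lemma pickFreeA_min (used : List (Int × Int × Int × Int)) :
    ∀ (m : List (Int × Int × Int × Int)) (r : Int × Int × Int × Int),
      pickFreeA used m = some r → PySem.List.min? m (cnt used) = some r := by
  intro m
  induction m with
  | nil => intro r h; simp [pickFreeA] at h
  | cons x m ih =>
    intro r h
    simp only [pickFreeA] at h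
    rw [min?_eq_foldl]
    simp only [List.foldl_cons]
    have hfirst : mstep (cnt used) none x = some x := rfl
    rw [hfirst]
    by_cases hx : used.any (fun u => rects_overlap x u 4) = true
    · rw [if_pos hx] at h
      have hr := ih r h
      rw [min?_eq_foldl] at hr
      have hrz : cnt used r = 0 := pickFreeA_zero used m r h
      have hxpos : cnt used x ≠ 0 := by
        intro h0
        have := (any_eq_cnt used x).mpr h0
        rw [this] at hx; cases hx
      have hxnn : 0 ≤ cnt used x := cnt_nonneg used x
      exact foldl_mstep_none_seed (cnt used) m x r hr (by omega)
    · rw [if_neg hx] at h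
      cases h
      have hz : cnt used x = 0 :=
        (any_eq_cnt used x).mp (by revert hx; cases used.any (fun u => rects_overlap x u 4) <;> simp)
      exact foldl_mstep_stay (cnt used) m x (fun y _ => by have := cnt_nonneg used y; omega)

-- the candidate list and the clamping map, as the ports build them (proof-side names)
def candsOf (box : Int × Int × Int × Int) (label_width : Int) (label_height : Int) : List (Int × Int) :=
  [(box.1, box.2.1 - label_height - 8), (box.1, box.2.2.2 + 8),
   (box.2.2.1 - label_width, box.2.1 - label_height - 8), (box.2.2.1 - label_width, box.2.2.2 + 8),
   (box.2.2.1 + 8, box.2.1), (box.1 - label_width - 8, box.2.1), (box.1, box.2.1)]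

def clampF (label_width : Int) (label_height : Int) (image_width : Int) (image_height : Int) : Int × Int → Int × Int × Int × Int :=
  fun p => clamp_label_rect p.1 p.2 label_width label_height image_width image_height

lemma A_eq (box : Int × Int × Int × Int) (lw lh iw ihh : Int) (used : List (Int × Int × Int × Int)) :
    choose_label_rect box lw lh iw ihh used
      = (PySem.List.min? ((candsOf box lw lh).map (clampF lw lh iw ihh)) (cnt used)).getD (0, 0, 0, 0) := by
  show (match pickFreeA used ((candsOf box lw lh).map (clampF lw lh iw ihh)) with
        | some r => r
        | none =>
            (PySem.List.min? ((candsOf box lw lh).map (clampF lw lh iw ihh))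
              (fun rect => used.foldl (fun s u => if rects_overlap rect u 4 then s + 1 else s) (0 : Int))).getD (0, 0, 0, 0)) = _
  have hkey : (fun rect => used.foldl (fun s u => if rects_overlap rect u 4 then s + 1 else s) (0 : Int)) = cnt used := rfl
  rw [hkey]
  cases hp : pickFreeA used ((candsOf box lw lh).map (clampF lw lh iw ihh)) with
  | none => rfl
  | some r => rw [pickFreeA_min used _ r hp]; rfl

-- ovB is rects_overlap at padding 4
lemma ovB_eq (r u : Int × Int × Int × Int) : ovB r u = rects_overlap r u 4 := rfl

-- one zipWith update step, applied to a mapped count vector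
lemma zipWith_step {α : Type} (l : List α) (f : α → Int → Int) (g : α → Int) :
    List.zipWith (fun r c => f r c) l (l.map g) = l.map (fun r => f r (g r)) := by
  induction l with
  | nil => rfl
  | cons x l ih => simp [ih]

-- loop transposition: folding the vector update over 'used' computes, per candidate,
-- the same per-rect count A's key computes
lemma transpose (l : List (Int × Int × Int × Int)) (used : List (Int × Int × Int × Int)) :
    ∀ (g : (Int × Int × Int × Int) → Int),
      used.foldl (fun counts u => List.zipWith (fun r c => if ovB r u then c + 1 else c) l counts) (l.map g)
        = l.map (fun r => used.foldl (fun s u => if rects_overlap r u 4 then s + 1 else s) (g r)) := by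
  induction used with
  | nil => intro g; rfl
  | cons u used ih =>
    intro g
    simp only [List.foldl_cons]
    rw [zipWith_step l (fun r c => if ovB r u then c + 1 else c) g, ih]
    simp only [ovB_eq]
    rfl

lemma replicate_eq_map {α : Type} (l : List α) :
    List.replicate l.length (0 : Int) = l.map (fun _ => (0 : Int)) := by
  induction l with
  | nil => rfl
  | cons x l ih => rw [List.length_cons, List.replicate_succ, List.map_cons, ih]

lemma zip_self_map {α : Type} (l : List α) (f : α → Int) :
    List.zip l (l.map f) = l.map (fun x => (x, f x)) := by
  induction l with
  | nil => rfl
  | cons x l ih => simp [ih]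

lemma foldl_pstep_pair {α : Type} (c : α → Int) (m : List α) :
    ∀ (o : Option α),
      (m.map (fun x => (x, c x))).foldl pstep (o.map (fun b => (b, c b)))
        = (m.foldl (mstep c) o).map (fun b => (b, c b)) := by
  induction m with
  | nil => intro o; rfl
  | cons x m ih =>
    intro o
    simp only [List.map_cons, List.foldl_cons]
    have hstep : pstep (o.map (fun b => (b, c b))) (x, c x) = (mstep c o x).map (fun b => (b, c b)) := by
      cases o with
      | none => rfl
      | some b =>
        simp only [Option.map_some, pstep, mstep]
        by_cases h : c x < c b
        · rw [if_pos h, if_pos h]; rfl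
        · rw [if_neg h, if_neg h]; rfl
    rw [hstep, ih]

lemma B_eq (box : Int × Int × Int × Int) (lw lh iw ihh : Int) (used : List (Int × Int × Int × Int)) :
    choose_label_rect_alt box lw lh iw ihh used
      = (PySem.List.min? ((candsOf box lw lh).map (clampF lw lh iw ihh)) (cnt used)).getD (0, 0, 0, 0) := by
  show (match (List.zip ((candsOf box lw lh).map (clampF lw lh iw ihh))
        (used.foldl (fun counts u => List.zipWith (fun r c => if ovB r u then c + 1 else c)
            ((candsOf box lw lh).map (clampF lw lh iw ihh)) counts)
          (List.replicate ((candsOf box lw lh).map (clampF lw lh iw ihh)).length (0 : Int)))).foldl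
        (fun acc p => match acc with
          | none => some p
          | some b => if p.2 < b.2 then some p else some b) none with
      | some b => b.1
      | none => ((0 : Int), (0 : Int), (0 : Int), (0 : Int))) = _
  set l := (candsOf box lw lh).map (clampF lw lh iw ihh) with hl
  rw [replicate_eq_map l, transpose l used (fun _ => 0)]
  have hcnt : l.map (fun r => used.foldl (fun s u => if rects_overlap r u 4 then s + 1 else s) ((fun _ => (0 : Int)) r))
      = l.map (cnt used) := rfl
  rw [hcnt, zip_self_map l (cnt used)]
  have hpf : (fun (acc : Option ((Int × Int × Int × Int) × Int)) p => match acc with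
      | none => some p
      | some b => if p.2 < b.2 then some p else some b) = @pstep (Int × Int × Int × Int) := by
    funext acc p; cases acc <;> rfl
  rw [hpf]
  have h := foldl_pstep_pair (cnt used) l none
  simp only [Option.map_none] at h
  rw [h, min?_eq_foldl]
  cases l.foldl (mstep (cnt used)) none <;> rfl

-- ===== VERDICT (by name: the statement is the Claim_ definition above) =====
theorem choose_label_rect_spec : Claim_equal_choose_label_rect := by
  intro box lw lh iw ihh used _
  unfold Spec_choose_label_rect
  rw [A_eq, B_eq]
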